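-- pv_equiv track=rewrite | github.com/wen-wei-055/EQ-RA | CESNet/train.py | latlon_ID
-- ===== SOURCE A (Python) =====
-- def latlon_ID(stations_table):
--     appear_first = {}
--     appear_dic = {}
--     i = 0
--     for id_name, instrument_name in enumerate(stations_table):
--         latlon = ','.join(instrument_name.split(',')[:2])
--
--         if latlon not in appear_first.keys():
--             appear_first[latlon] = i
--             appear_dic[id_name] = i
--             i += 1
--         if latlon in appear_first.keys():
--             appear_dic[id_name] = appear_first[latlon]
--     return appear_dic
-- ===== SOURCE B (Python) =====
-- def latlon_ID(stations_table):
--     # id of a prefix = number of distinct prefixes strictly before its first occurrence: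
--     # no id-assignment state, each value is computed positionally.
--     latlons = [','.join(s.split(',')[:2]) for s in stations_table]
--     return {i: len(set(latlons[:latlons.index(ll)]))
--             for i, ll in enumerate(latlons)}
-- ===== Notes on version B (the rewrite author's own statement) =====
-- stated objective: alternative
-- what changed: B keeps no id-assignment state at all: each index's id is computed positionally as the number of distinct prefixes strictly before the first occurrence of its own prefix (len(set(latlons[:latlons.index(ll)]))), instead of A's single interleaved scan that assigns incremental ids through two dicts and a manual counter.
import Mathlib
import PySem

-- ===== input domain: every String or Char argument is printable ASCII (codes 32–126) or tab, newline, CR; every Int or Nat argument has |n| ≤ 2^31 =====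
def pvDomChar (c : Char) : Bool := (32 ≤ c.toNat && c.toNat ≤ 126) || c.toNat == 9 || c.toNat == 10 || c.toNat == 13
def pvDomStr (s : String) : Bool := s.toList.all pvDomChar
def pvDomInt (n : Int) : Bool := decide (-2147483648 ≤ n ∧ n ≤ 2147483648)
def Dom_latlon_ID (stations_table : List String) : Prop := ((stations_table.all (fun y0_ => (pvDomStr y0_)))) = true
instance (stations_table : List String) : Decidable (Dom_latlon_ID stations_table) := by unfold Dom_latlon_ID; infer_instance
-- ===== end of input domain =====

-- B is 'alternative': no id-assignment state — each index's id is computed positionally as the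
-- number of distinct prefixes strictly before the first occurrence of its own prefix,
-- instead of A's interleaved scan assigning incremental ids through two dicts and a counter.

-- latlon = ','.join(s.split(',')[:2])   (identical expression in both Pythons; the separator
-- ',' is non-empty, so Str.split? is always 'some' and the getD [] is never taken)
def pvLatlon (s : String) : String :=
  PySem.Str.join "," (PySem.List.slice ((PySem.Str.split? s ",").getD []) none (some 2))

-- ===== PORT A =====
-- A's loop body: state = (appear_first, appear_dic, i); both ifs, in A's order
def pvStepA (st : PySem.Dict String Int × PySem.Dict Int Int × Int) (p : Int × String) :
    PySem.Dict String Int × PySem.Dict Int Int × Int :=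
  let latlon := pvLatlon p.2
  let st :=
    if ¬ st.1.contains latlon then
      (st.1.insert latlon st.2.2, (st.2.1.insert p.1 st.2.2, st.2.2 + 1))
    else st
  if st.1.contains latlon then
    (st.1, (st.2.1.insert p.1 (st.1.getD latlon 0), st.2.2))
  else st

def latlon_ID (stations_table : List String) : List (Int × Int) :=
  ((PySem.List.enumerate stations_table 0).foldl pvStepA
    (PySem.Dict.empty, (PySem.Dict.empty, 0))).2.1.items

-- ===== PORT B =====
-- B: latlons = [','.join(s.split(',')[:2]) for s in stations_table];
--    {i: len(set(latlons[:latlons.index(ll)])) for i, ll in enumerate(latlons)}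
-- latlons.index(ll) always succeeds (ll is drawn from latlons), so the getD 0 is never taken.
def latlon_ID_alt (stations_table : List String) : List (Int × Int) :=
  let latlons := stations_table.map pvLatlon
  ((PySem.List.enumerate latlons 0).foldl
    (fun (r : PySem.Dict Int Int) p =>
      r.insert p.1
        ((PySem.Set.ofList (PySem.List.slice latlons none
            (some (((PySem.List.index? latlons p.2).getD 0 : Nat) : Int)))).length : Int))
    PySem.Dict.empty).items

-- ===== PRECONDITION & SPEC =====
def Spec_latlon_ID (stations_table : List String) (out : List (Int × Int)) : Prop := out = latlon_ID_alt stations_table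
instance (stations_table : List String) (out : List (Int × Int)) : Decidable (Spec_latlon_ID stations_table out) := by unfold Spec_latlon_ID; infer_instance

-- ===== CLAIM (what is proved, stated in full; the proofs are below) =====
def Claim_equal_latlon_ID : Prop := ∀ (stations_table : List String), Dom_latlon_ID stations_table → Spec_latlon_ID stations_table (latlon_ID stations_table)

-- ===== LEMMAS AND PROOFS =====

-- the first-occurrence table A's scan builds, abstracted (proof tool only; appears in no claim)
def pvBuild (ls : List String) (d : PySem.Dict String Int) : PySem.Dict String Int :=
  ls.foldl (fun d ll => if ¬ d.contains ll then d.insert ll (d.size : Int) else d) d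

lemma pvBuild_cons (ll : String) (ls : List String) (d : PySem.Dict String Int) :
    pvBuild (ll :: ls) d
      = pvBuild ls (if ¬ d.contains ll then d.insert ll (d.size : Int) else d) := rfl

-- later first-occurrence insertions never change existing bindings
lemma pvBuild_getD_of_contains (ls : List String) (d : PySem.Dict String Int) (k : String)
    (h : d.contains k = true) : (pvBuild ls d).getD k 0 = d.getD k 0 := by
  induction ls generalizing d with
  | nil => rfl
  | cons ll ls ih =>
      rw [pvBuild_cons]
      by_cases hc : d.contains ll = true
      · rw [if_neg (by simp [hc])]
        exact ih d h
      · rw [if_pos hc]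
        have hne : k ≠ ll := by intro e; rw [e] at h; exact hc h
        rw [ih _ (by rw [PySem.Dict.contains_insert]; simp [h])]
        exact PySem.Dict.getD_insert_of_ne _ _ _ hne

-- A's step, case-reduced: the double insert in the new-prefix branch collapses
lemma pvStepA_eq (st : PySem.Dict String Int × PySem.Dict Int Int × Int) (p : Int × String) :
    pvStepA st p =
      if st.1.contains (pvLatlon p.2) then
        (st.1, (st.2.1.insert p.1 (st.1.getD (pvLatlon p.2) 0), st.2.2))
      else
        (st.1.insert (pvLatlon p.2) st.2.2, (st.2.1.insert p.1 st.2.2, st.2.2 + 1)) := by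
  by_cases hc : st.1.contains (pvLatlon p.2) = true <;>
    simp [pvStepA, hc, PySem.Dict.getD_insert_self,
      PySem.Dict.insert_insert_self]

lemma pvEnumerate_map {α β : Type} (f : α → β) (xs : List α) (n : Int) :
    PySem.List.enumerate (xs.map f) n
      = (PySem.List.enumerate xs n).map (fun p => (p.1, f p.2)) := by
  induction xs generalizing n with
  | nil => rfl
  | cons x xs ih => simp [PySem.List.enumerate_cons, ih]

-- A's interleaved scan, characterised against the abstract first-occurrence table
lemma pvA_items (xs : List String) :
    ∀ (n : Int) (af : PySem.Dict String Int) (ad : PySem.Dict Int Int),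
    (∀ j ∈ ad.keys, j < n) →
    ((PySem.List.enumerate xs n).foldl pvStepA (af, (ad, (af.size : Int)))).2.1.items
      = ad.items ++ (PySem.List.enumerate xs n).map
          (fun p => (p.1, (pvBuild (xs.map pvLatlon) af).getD (pvLatlon p.2) 0)) := by
  induction xs with
  | nil => intro n af ad _; simp [PySem.List.enumerate_nil]
  | cons x xs ih =>
      intro n af ad hlt
      have hn : ad.contains n = false := by
        by_contra h
        have hm := (PySem.Dict.contains_iff_mem_keys ad n).mp (by simpa using h)
        have := hlt n hm
        omega
      rw [PySem.List.enumerate_cons, List.foldl_cons, pvStepA_eq, List.map_cons,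
        List.map_cons, pvBuild_cons]
      by_cases hc : af.contains (pvLatlon x) = true
      · rw [if_pos hc, if_neg (by simp [hc])]
        rw [ih (n + 1) af (ad.insert n (af.getD (pvLatlon x) 0))
              (by intro j hj
                  rcases (PySem.Dict.mem_keys_insert _ _ _ _).mp hj with h | h
                  · omega
                  · have := hlt j h; omega)]
        rw [PySem.Dict.items_insert_of_not_contains _ _ hn]
        rw [pvBuild_getD_of_contains _ _ _ hc]
        simp
      · rw [if_neg hc, if_pos (by simpa using hc)]
        have hs : ((af.size : Int) + 1) = ((af.insert (pvLatlon x) (af.size : Int)).size : Int) := by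
          rw [PySem.Dict.size_insert]; simp [hc]
        rw [hs,
          ih (n + 1) (af.insert (pvLatlon x) (af.size : Int)) (ad.insert n (af.size : Int))
            (by intro j hj
                rcases (PySem.Dict.mem_keys_insert _ _ _ _).mp hj with h | h
                · omega
                · have := hlt j h; omega)]
        rw [PySem.Dict.items_insert_of_not_contains _ _ hn]
        rw [pvBuild_getD_of_contains _ _ _ (by simp)]
        rw [PySem.Dict.getD_insert_self]
        simp

-- the table's binding for k IS the number of distinct prefixes before k's first occurrence
lemma pvBuild_getD_set (ls : List String) (k : String) :
    ∀ (d : PySem.Dict String Int) (seen : PySem.Set String),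
    (∀ y, d.contains y = true ↔ y ∈ seen) →
    (d.size : Int) = (seen.length : Int) →
    k ∉ seen → k ∈ ls →
    (pvBuild ls d).getD k 0 = ((PySem.Set.update seen (ls.take (ls.idxOf k))).length : Int) := by
  induction ls with
  | nil => intro d seen _ _ _ hk; cases hk
  | cons x xs ih =>
      intro d seen hc hs hns hk
      rw [pvBuild_cons]
      by_cases hxk : x = k
      · subst hxk
        have hdk : d.contains x = false := by
          by_contra h
          exact hns ((hc x).mp (by simpa using h))
        rw [if_pos (by simp [hdk])]
        rw [pvBuild_getD_of_contains _ _ _ (by simp)]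
        rw [PySem.Dict.getD_insert_self]
        simp [List.idxOf_cons_self, PySem.Set.update_nil, hs]
      · have hxk' : k ≠ x := fun e => hxk e.symm
        have hidx : (x :: xs).idxOf k = xs.idxOf k + 1 :=
          List.idxOf_cons_ne xs hxk
        have hmem : k ∈ xs := by
          rcases List.mem_cons.mp hk with h | h
          · exact absurd h.symm hxk
          · exact h
        rw [hidx, List.take_succ_cons, PySem.Set.update_cons]
        by_cases hcx : d.contains x = true
        · rw [if_neg (by simp [hcx])]
          have hxseen : x ∈ seen := (hc x).mp hcx
          have hadd : PySem.Set.add seen x = seen := by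
            simp [PySem.Set.add, PySem.Set.contains, hxseen]
          rw [hadd]
          exact ih d seen hc hs hns hmem
        · rw [if_pos hcx]
          have hxseen : x ∉ seen := fun h => by simp [(hc x).mpr h] at hcx
          have hadd : PySem.Set.add seen x = seen ++ [x] := by
            simp [PySem.Set.add, PySem.Set.contains, hxseen]
          rw [hadd]
          refine ih _ (seen ++ [x]) ?_ ?_ ?_ hmem
          · intro y
            rw [PySem.Dict.contains_insert]
            constructor
            · intro h
              rcases Bool.or_eq_true_iff.mp h with h | h
              · simp [eq_of_beq h]
              · simpa using Or.inl ((hc y).mp h)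
            · intro h
              rcases List.mem_append.mp h with h | h
              · simp [(hc y).mpr h]
              · simp [List.mem_singleton.mp h]
          · rw [PySem.Dict.size_insert]
            simp [hcx] at *
            omega
          · intro h
            rcases List.mem_append.mp h with h | h
            · exact hns h
            · exact hxk' (List.mem_singleton.mp h)

-- index into the latlons list always succeeds, at the first occurrence
lemma pvIndex_mem {α : Type} [DecidableEq α] (ls : List α) (k : α) (h : k ∈ ls) :
    PySem.List.index? ls k = some (ls.idxOf k) := by
  rw [PySem.List.index?_eq_idxOf?]
  induction ls with
  | nil => cases h
  | cons x xs ih =>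
      by_cases e : x = k
      · subst e; simp [List.idxOf?_cons, List.idxOf_cons_self]
      · rcases List.mem_cons.mp h with h' | h'
        · exact absurd h'.symm e
        · simp [List.idxOf?_cons, List.idxOf_cons_ne _ e, e, ih h']

-- ===== VERDICT (by name: the statement is the Claim_ definition above) =====
theorem latlon_ID_spec : Claim_equal_latlon_ID := by
  intro xs _
  unfold Spec_latlon_ID latlon_ID latlon_ID_alt
  have hA := pvA_items xs 0 PySem.Dict.empty PySem.Dict.empty (by simp [PySem.Dict.keys_empty])
  simp only [PySem.Dict.size_empty, Int.natCast_zero] at hA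
  rw [hA]
  have hB := PySem.Dict.items_foldl_insert_fresh
      (PySem.List.enumerate (xs.map pvLatlon) 0) (fun p => p.1)
      (fun p => ((PySem.Set.ofList (PySem.List.slice (xs.map pvLatlon) none
            (some (((PySem.List.index? (xs.map pvLatlon) p.2).getD 0 : Nat) : Int)))).length : Int))
      PySem.Dict.empty
      (by intro a _; simp [PySem.Dict.contains_empty])
      (by rw [PySem.List.map_fst_enumerate]; exact PySem.List.nodup_pyRange_one _ _)
  simp only at hB
  rw [hB]
  rw [pvEnumerate_map]
  simp only [List.map_map]
  apply List.map_congr_left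
  intro p hp
  have hmem : pvLatlon p.2 ∈ xs.map pvLatlon := by
    rcases (PySem.List.mem_enumerate_iff _ _ _).mp hp with ⟨j, hj, rfl⟩
    exact List.mem_map_of_mem (List.getElem_mem hj)
  simp only [Function.comp]
  rw [pvIndex_mem _ _ hmem, Option.getD_some,
    PySem.List.slice_to_natCast]
  rw [pvBuild_getD_set (xs.map pvLatlon) (pvLatlon p.2) PySem.Dict.empty []
    (by intro y; simp [PySem.Dict.contains_empty]) (by simp [PySem.Dict.size_empty])
    (by simp) hmem]
  rw [PySem.Set.update_nil_left]
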